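-- pv_equiv track=rewrite | github.com/miliar/Code_Jam_Webscraper | solutions_python/Problem_97/1635.py | is_dpt
-- ===== SOURCE A (Python) =====
-- def rotate(L, N):
--     return L[N:] + L[:N]
--
-- def is_dpt(int1,int2):
--     int1 = str(int1)
--     int2 = str(int2)
--     if (len((int1)) == len((int2))):
--         for i in range(1, len(int1)+1):
--             if int1 ==rotate(int2,i):
--                 return True
--
--     return False
-- ===== SOURCE B (Python) =====
-- def is_dpt(int1, int2):
--     s1 = str(int1)
--     s2 = str(int2)
--     return len(s1) == len(s2) and s1 in s2 + s2
-- ===== Notes on version B (the rewrite author's own statement) =====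
-- stated objective: simpler
-- what changed: Replaces the explicit rotate helper and the loop over all rotation amounts by the doubled-string trick: with equal lengths, int1 is a rotation of int2 iff str(int1) is a substring of str(int2)+str(int2).
import Mathlib
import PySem

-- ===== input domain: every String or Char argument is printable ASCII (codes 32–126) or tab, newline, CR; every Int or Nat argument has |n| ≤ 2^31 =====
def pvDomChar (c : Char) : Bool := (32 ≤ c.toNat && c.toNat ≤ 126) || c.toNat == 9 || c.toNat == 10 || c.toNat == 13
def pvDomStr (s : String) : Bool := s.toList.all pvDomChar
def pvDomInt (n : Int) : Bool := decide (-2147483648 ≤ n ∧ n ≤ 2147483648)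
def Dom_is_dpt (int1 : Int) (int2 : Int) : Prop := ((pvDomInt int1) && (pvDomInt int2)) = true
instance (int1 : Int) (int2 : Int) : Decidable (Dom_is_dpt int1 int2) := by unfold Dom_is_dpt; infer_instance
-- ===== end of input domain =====

-- B drops A's rotate helper and its loop over all rotation amounts in favour of the
-- doubled-string trick: equal lengths plus substring of str(int2)+str(int2); objective: simpler.

-- ===== PORT A =====
-- rotate(L, N) = L[N:] + L[:N]
def rotate (L : List Char) (N : Int) : List Char :=
  PySem.List.slice L (some N) none ++ PySem.List.slice L none (some N)

-- str(int1)/str(int2) are PySem.Int.toChars; the for-loop with early `return True` is `.any`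
def is_dpt (int1 : Int) (int2 : Int) : Bool :=
  let s1 := PySem.Int.toChars int1
  let s2 := PySem.Int.toChars int2
  if s1.length = s2.length then
    (PySem.List.pyRange 1 ((s1.length : Int) + 1) 1).any (fun i => s1 == rotate s2 i)
  else
    false

-- ===== PORT B =====
-- len(s1) == len(s2) and s1 in s2 + s2
def is_dpt_alt (int1 : Int) (int2 : Int) : Bool :=
  let s1 := PySem.Int.toChars int1
  let s2 := PySem.Int.toChars int2
  (s1.length == s2.length) && PySem.Chars.isIn s1 (s2 ++ s2)

-- ===== PRECONDITION & SPEC =====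
def Spec_is_dpt (int1 : Int) (int2 : Int) (out : Bool) : Prop := out = is_dpt_alt int1 int2
instance (int1 : Int) (int2 : Int) (out : Bool) : Decidable (Spec_is_dpt int1 int2 out) := by unfold Spec_is_dpt; infer_instance

-- ===== CLAIM (what is proved, stated in full; the proofs are below) =====
def Claim_equal_is_dpt : Prop := ∀ (int1 : Int) (int2 : Int), Dom_is_dpt int1 int2 → Spec_is_dpt int1 int2 (is_dpt int1 int2)

-- ===== LEMMAS AND PROOFS =====

theorem toDigitsCore_ne_nil (b f n : Nat) (l : List Char) (h : 0 < f ∨ l ≠ []) :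
    Nat.toDigitsCore b f n l ≠ [] := by
  induction f generalizing n l with
  | zero =>
    simp only [Nat.toDigitsCore]
    rcases h with h | h
    · omega
    · exact h
  | succ f ih =>
    simp only [Nat.toDigitsCore]
    split
    · simp
    · exact ih _ _ (Or.inr (by simp))

theorem toChars_ne_nil (n : Int) : PySem.Int.toChars n ≠ [] := by
  unfold PySem.Int.toChars
  split
  · simp
  · exact toDigitsCore_ne_nil 10 _ _ [] (Or.inl (Nat.succ_pos _))

theorem rotate_natCast (s : List Char) (k : Nat) :
    rotate s (k : Int) = s.drop k ++ s.take k := by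
  simp [rotate, PySem.List.slice_from_natCast, PySem.List.slice_to_natCast]

-- drop-then-take of the doubled list is exactly the rotation, for k ≤ length
theorem take_drop_double (s : List Char) (k : Nat) (hk : k ≤ s.length) :
    ((s ++ s).drop k).take s.length = s.drop k ++ s.take k := by
  rw [List.drop_append]
  have h0 : k - s.length = 0 := by omega
  rw [h0, List.drop_zero, List.take_append]
  have h1 : (s.drop k).take s.length = s.drop k :=
    List.take_of_length_le (by simp)
  have h2 : s.length - (s.drop k).length = k := by simp; omega
  rw [h1, h2]

-- the heart: A's rotation loop agrees with B's doubled-string substring test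
theorem any_rotate_eq_isIn (s1 s2 : List Char) (hne : s2 ≠ [])
    (hlen : s1.length = s2.length) :
    ((PySem.List.pyRange 1 ((s1.length : Int) + 1) 1).any (fun i => s1 == rotate s2 i))
      = PySem.Chars.isIn s1 (s2 ++ s2) := by
  rw [Bool.eq_iff_iff, List.any_eq_true, PySem.Chars.isIn_iff_infix]
  have hpos : 0 < s2.length := List.length_pos_iff.mpr hne
  constructor
  · rintro ⟨i, hmem, hbeq⟩
    rw [PySem.List.mem_pyRange_one] at hmem
    obtain ⟨h1, h2⟩ := hmem
    have hk : i = ((i.toNat : Nat) : Int) := (Int.toNat_of_nonneg (by omega)).symm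
    have hkle : i.toNat ≤ s2.length := by omega
    rw [beq_iff_eq, hk, rotate_natCast] at hbeq
    refine ⟨s2.take i.toNat, s2.drop i.toNat, ?_⟩
    rw [hbeq]
    simp only [List.append_assoc, List.take_append_drop]
    rw [← List.append_assoc, List.take_append_drop]
  · rintro ⟨u, v, huv⟩
    have hulen : u.length ≤ s2.length := by
      have := congrArg List.length huv
      simp at this; omega
    have hs1 : s1 = s2.drop u.length ++ s2.take u.length := by
      have : ((s2 ++ s2).drop u.length).take s1.length
          = ((u ++ (s1 ++ v)).drop u.length).take s1.length := by
        rw [← List.append_assoc, huv]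
      rw [List.drop_left, List.take_left] at this
      rw [← this, hlen, take_drop_double s2 u.length hulen]
    by_cases h0 : u.length = 0
    · -- s1 = s2: A finds it at i = len(s1)
      refine ⟨(s2.length : Int), ?_, ?_⟩
      · rw [PySem.List.mem_pyRange_one]; omega
      · rw [beq_iff_eq, rotate_natCast]
        rw [hs1, h0]
        simp
    · refine ⟨(u.length : Int), ?_, ?_⟩
      · rw [PySem.List.mem_pyRange_one]; omega
      · rw [beq_iff_eq, rotate_natCast]
        exact hs1

-- ===== VERDICT (by name: the statement is the Claim_ definition above) =====
theorem is_dpt_spec : Claim_equal_is_dpt := by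
  intro int1 int2 _
  unfold Spec_is_dpt is_dpt is_dpt_alt
  by_cases h : (PySem.Int.toChars int1).length = (PySem.Int.toChars int2).length
  · simp only [h, if_pos, beq_self_eq_true, Bool.true_and]
    rw [← h]
    exact any_rotate_eq_isIn _ _ (toChars_ne_nil int2) h
  · simp [h]
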